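-- pv_equiv track=rewrite | github.com/Sergio-Sanchez96/twinstop | denovo_selenoproteins_hercules.py | make_aligned_cds
-- ===== SOURCE A (Python) =====
-- def make_aligned_cds(subj_aligned_cds, query_aligned_cds, subj_aligned_pep, query_aligned_pep):
--     '''
--     Function to insert gaps into the nucleotidic sequences of both query
--     and subject.
--
--     Parameters
--     ----------
--     subj_aligned_cds : String
--         Nucleotide sequence from the subject
--     query_aligned_cds : String
--         Nucleotide sequence from the query
--     subj_aligned_pep : String
--         Protein sequence from the subject
--     query_aligned_pep : String
--         Protein sequence from the query
--
--     Returns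
--     -------
--     subj_aligned_cds : String
--         Nucleotide sequence from the subject, with gaps
--     query_aligned_cds : String
--         Nucleotide sequence from the query, with gaps
--     '''
--
--     # subj_aligned_cds = subj_cds
--     # query_aligned_cds = query_cds
--
--     for idx, x in enumerate(subj_aligned_pep):
--         # for each gap on protein sequence we have to add 3 gaps on the cds
--         # sequence.
--         if x == '-':
--             subj_aligned_cds = (
--                 subj_aligned_cds[:idx * 3] + '-' * 3 +
--                 subj_aligned_cds[idx * 3:])
--     for idx, x in enumerate(query_aligned_pep):
--         if x == '-':
--             query_aligned_cds = (
--                 query_aligned_cds[:idx * 3] + '-' * 3 +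
--                 query_aligned_cds[idx * 3:])
--
--     return subj_aligned_cds, query_aligned_cds
-- ===== SOURCE B (Python) =====
-- def make_aligned_cds(subj_aligned_cds, query_aligned_cds, subj_aligned_pep, query_aligned_pep):
--     def with_gaps(cds, pep):
--         parts = []
--         p = 0
--         for x in pep:
--             if x == '-':
--                 parts.append('---')
--             else:
--                 parts.append(cds[p:p + 3])
--                 p += 3
--         parts.append(cds[p:])
--         return ''.join(parts)
--     return with_gaps(subj_aligned_cds, subj_aligned_pep), with_gaps(query_aligned_cds, query_aligned_pep)
-- ===== Notes on version B (the rewrite author's own statement) =====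
-- stated objective: alternative
-- what changed: Instead of repeatedly slicing and rebuilding the whole growing CDS string at each gap position, B makes a single left-to-right pass over the peptide with a pointer into the original CDS, collecting '---' or 3-nucleotide chunks into a list joined once at the end.
import Mathlib
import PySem

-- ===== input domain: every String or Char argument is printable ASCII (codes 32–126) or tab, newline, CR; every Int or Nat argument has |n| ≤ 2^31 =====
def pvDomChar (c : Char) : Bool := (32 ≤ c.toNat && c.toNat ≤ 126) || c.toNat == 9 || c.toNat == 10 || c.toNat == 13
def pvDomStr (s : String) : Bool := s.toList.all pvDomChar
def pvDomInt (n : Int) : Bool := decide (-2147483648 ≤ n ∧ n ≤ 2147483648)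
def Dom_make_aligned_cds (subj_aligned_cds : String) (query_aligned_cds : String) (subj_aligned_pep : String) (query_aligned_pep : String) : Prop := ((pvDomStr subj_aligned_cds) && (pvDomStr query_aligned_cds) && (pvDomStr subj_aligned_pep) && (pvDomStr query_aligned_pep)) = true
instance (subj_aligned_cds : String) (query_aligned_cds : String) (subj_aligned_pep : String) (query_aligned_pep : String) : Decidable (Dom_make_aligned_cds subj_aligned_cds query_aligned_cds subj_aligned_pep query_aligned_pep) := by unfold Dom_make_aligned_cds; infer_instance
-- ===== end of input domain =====

-- B replaces A's repeated slice-and-reinsert of the growing CDS string by a single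
-- left-to-right pass with a pointer into the original CDS, collecting chunks and joining once.

-- ===== PORT A =====
-- A's loop body: acc = acc[:idx*3] + '-'*3 + acc[idx*3:] when pep[idx] == '-'
def pvAStep (acc : List Char) (ix : Int × Char) : List Char :=
  if ix.2 = '-' then
    PySem.List.slice acc none (some (ix.1 * 3)) ++ ['-', '-', '-'] ++
      PySem.List.slice acc (some (ix.1 * 3)) none
  else acc

-- one 'for idx, x in enumerate(pep)' loop of A over a cds accumulator
def pvALoop (cds : List Char) (pep : List Char) : List Char :=
  (PySem.List.enumerate pep 0).foldl pvAStep cds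

def make_aligned_cds (subj_aligned_cds : String) (query_aligned_cds : String) (subj_aligned_pep : String) (query_aligned_pep : String) : String × String :=
  (String.ofList (pvALoop subj_aligned_cds.toList subj_aligned_pep.toList),
   String.ofList (pvALoop query_aligned_cds.toList query_aligned_pep.toList))

-- ===== PORT B =====
-- B's loop body over state (parts, p): gap appends '---', otherwise append cds[p:p+3] and advance p
def pvBStep (cds : List Char) (st : List (List Char) × Nat) (x : Char) : List (List Char) × Nat :=
  if x = '-' then (st.1 ++ [['-', '-', '-']], st.2)
  else (st.1 ++ [PySem.List.slice cds (some (st.2 : Int)) (some ((st.2 + 3 : Nat) : Int))], st.2 + 3)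

-- B's with_gaps helper: build the parts list, append the tail cds[p:], join
def pvBGaps (cds : List Char) (pep : List Char) : List Char :=
  let st := pep.foldl (pvBStep cds) ([], 0)
  (st.1 ++ [PySem.List.slice cds (some (st.2 : Int)) none]).flatten

def make_aligned_cds_alt (subj_aligned_cds : String) (query_aligned_cds : String) (subj_aligned_pep : String) (query_aligned_pep : String) : String × String :=
  (String.ofList (pvBGaps subj_aligned_cds.toList subj_aligned_pep.toList),
   String.ofList (pvBGaps query_aligned_cds.toList query_aligned_pep.toList))

-- ===== PRECONDITION & SPEC =====
def Spec_make_aligned_cds (subj_aligned_cds : String) (query_aligned_cds : String) (subj_aligned_pep : String) (query_aligned_pep : String) (out : String × String) : Prop := out = make_aligned_cds_alt subj_aligned_cds query_aligned_cds subj_aligned_pep query_aligned_pep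
instance (subj_aligned_cds : String) (query_aligned_cds : String) (subj_aligned_pep : String) (query_aligned_pep : String) (out : String × String) : Decidable (Spec_make_aligned_cds subj_aligned_cds query_aligned_cds subj_aligned_pep query_aligned_pep out) := by unfold Spec_make_aligned_cds; infer_instance

-- ===== CLAIM (what is proved, stated in full; the proofs are below) =====
def Claim_equal_make_aligned_cds : Prop := ∀ (subj_aligned_cds : String) (query_aligned_cds : String) (subj_aligned_pep : String) (query_aligned_pep : String), Dom_make_aligned_cds subj_aligned_cds query_aligned_cds subj_aligned_pep query_aligned_pep → Spec_make_aligned_cds subj_aligned_cds query_aligned_cds subj_aligned_pep query_aligned_pep (make_aligned_cds subj_aligned_cds query_aligned_cds subj_aligned_pep query_aligned_pep)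

-- ===== LEMMAS AND PROOFS =====

-- Common recursive characterisation of the gap insertion, used as a bridge between A and B
def pvGRec (cds : List Char) (pep : List Char) : List Char :=
  match pep with
  | [] => cds
  | x :: xs =>
    if x = '-' then ['-', '-', '-'] ++ pvGRec cds xs
    else cds.take 3 ++ pvGRec (cds.drop 3) xs

lemma pvALoop_inv (pep : List Char) : ∀ (i : Nat) (built rest : List Char),
    built.length ≤ 3 * i → (built.length = 3 * i ∨ rest = []) →
    (PySem.List.enumerate pep (i : Int)).foldl pvAStep (built ++ rest) = built ++ pvGRec rest pep := by
  induction pep with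
  | nil => intro i built rest _ _; simp [PySem.List.enumerate_nil, pvGRec]
  | cons x xs ih =>
    intro i built rest hle hinv
    rw [PySem.List.enumerate_cons, List.foldl_cons]
    by_cases hx : x = '-'
    · have hstep : pvAStep (built ++ rest) ((i : Int), x) =
          (built ++ ['-', '-', '-']) ++ rest := by
        simp only [pvAStep, hx]
        have h3 : ((i : Int) * 3) = ((3 * i : Nat) : Int) := by push_cast; ring
        rw [h3, PySem.List.slice_to_natCast, PySem.List.slice_from_natCast]
        rcases hinv with h | h
        · rw [← h, List.take_left, List.drop_left]; simp
        · subst h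
          rw [List.append_nil, List.take_of_length_le (by omega),
            List.drop_eq_nil_of_le (by omega)]
          simp
      rw [hstep]
      have : ((i : Int) + 1) = ((i + 1 : Nat) : Int) := by push_cast; ring
      rw [this, ih (i + 1) (built ++ ['-', '-', '-']) rest (by simp; omega)
        (by rcases hinv with h | h
            · left; simp [h]; ring
            · right; exact h)]
      simp [pvGRec, hx]
    · have hstep : pvAStep (built ++ rest) ((i : Int), x) =
          (built ++ rest.take 3) ++ rest.drop 3 := by
        simp [pvAStep, hx]
      rw [hstep]
      have : ((i : Int) + 1) = ((i + 1 : Nat) : Int) := by push_cast; ring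
      rw [this, ih (i + 1) (built ++ rest.take 3) (rest.drop 3)
        (by simp; have := List.length_take_le 3 rest; omega)
        (by rcases hinv with h | h
            · by_cases hr : 3 ≤ rest.length
              · left; simp [List.length_take, h]; omega
              · right; exact List.drop_eq_nil_of_le (by omega)
            · subst h; right; simp)]
      simp [pvGRec, hx]

lemma pvALoop_eq_gRec (cds pep : List Char) : pvALoop cds pep = pvGRec cds pep := by
  have := pvALoop_inv pep 0 [] cds (by simp) (by simp)
  simpa [pvALoop] using this

lemma pvBLoop_inv (cds : List Char) (pep : List Char) : ∀ (parts : List (List Char)) (p : Nat),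
    ((pep.foldl (pvBStep cds) (parts, p)).1 ++
      [PySem.List.slice cds (some (((pep.foldl (pvBStep cds) (parts, p)).2 : Nat) : Int)) none]).flatten
      = parts.flatten ++ pvGRec (cds.drop p) pep := by
  induction pep with
  | nil => intro parts p; simp [pvGRec, PySem.List.slice_from_natCast]
  | cons x xs ih =>
    intro parts p
    rw [List.foldl_cons]
    by_cases hx : x = '-'
    · have e : pvBStep cds (parts, p) x = (parts ++ [['-', '-', '-']], p) := by
        simp [pvBStep, hx]
      rw [e, ih (parts ++ [['-', '-', '-']]) p]
      simp [pvGRec, hx]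
    · have e : pvBStep cds (parts, p) x =
          (parts ++ [PySem.List.slice cds (some (p : Int)) (some ((p + 3 : Nat) : Int))], p + 3) := by
        simp [pvBStep, hx]
      rw [e, ih _ (p + 3), PySem.List.slice_natCast]
      simp [pvGRec, hx, List.drop_drop, Nat.add_comm p 3]

lemma pvBGaps_eq_gRec (cds pep : List Char) : pvBGaps cds pep = pvGRec cds pep := by
  have := pvBLoop_inv cds pep [] 0
  simpa [pvBGaps] using this

-- ===== VERDICT (by name: the statement is the Claim_ definition above) =====
theorem make_aligned_cds_spec : Claim_equal_make_aligned_cds := by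
  intro sc qc sp qp _
  show _ = _
  unfold make_aligned_cds make_aligned_cds_alt
  rw [pvALoop_eq_gRec, pvALoop_eq_gRec, pvBGaps_eq_gRec, pvBGaps_eq_gRec]
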